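-- pv_equiv track=rewrite | github.com/RhodianVX/BelajarCPC | Latihan CP/tes.py | runtuh
-- ===== SOURCE A (Python) =====
-- def runtuh(papan):
--     R = len(papan)
--     C = len(papan[0])
--
--     while True:
--         baris_penuh = []
--         for i in range(R):
--             if all(papan[i][j] == '1' for j in range(C)):
--                 baris_penuh.append(i)
--
--         if not baris_penuh:
--             break
--
--         papan_baru = [['0' for _ in range(C)] for _ in range(R)]
--
--         for i in range(R - 1, -1, -1):
--             if i not in baris_penuh:
--                 for j in range(C):
--                     for k in range(R - 1, -1, -1):
--                         if papan_baru[k][j] == '0':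
--                             papan_baru[k][j] = papan[i][j]
--                             break
--
--         papan = papan_baru
--
--     return papan
-- ===== SOURCE B (Python) =====
-- def runtuh(papan):
--     C = len(papan[0])
--     while True:
--         full = [all(c == '1' for c in row[:C]) for row in papan]
--         if not any(full):
--             return papan
--         R = len(papan)
--         baru = [['0'] * C for _ in range(R)]
--         for j in range(C):
--             k = R - 1
--             for i in range(R - 1, -1, -1):
--                 if not full[i] and papan[i][j] != '0':
--                     baru[k][j] = papan[i][j]
--                     k -= 1
--         papan = baru
-- ===== Notes on version B (the rewrite author's own statement) =====
-- stated objective: alternative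
-- what changed: B replaces A's per-cell rescan for the lowest empty '0' slot (an inner k-loop over all rows for every written cell) by a per-column write pointer that walks the rows of each column once per collapse pass, skipping '0' cells.
import Mathlib
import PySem

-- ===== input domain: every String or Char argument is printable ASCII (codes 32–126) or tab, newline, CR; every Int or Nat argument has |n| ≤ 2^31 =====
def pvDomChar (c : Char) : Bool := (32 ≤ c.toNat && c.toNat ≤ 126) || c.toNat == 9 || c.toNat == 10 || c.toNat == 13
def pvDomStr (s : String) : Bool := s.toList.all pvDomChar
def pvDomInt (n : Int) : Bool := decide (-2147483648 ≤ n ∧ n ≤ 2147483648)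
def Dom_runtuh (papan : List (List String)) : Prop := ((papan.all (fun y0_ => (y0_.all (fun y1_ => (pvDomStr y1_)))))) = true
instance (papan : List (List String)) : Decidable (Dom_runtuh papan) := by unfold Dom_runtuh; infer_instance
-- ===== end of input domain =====

-- B replaces A's per-cell rescan for the lowest empty slot by a per-column write pointer
-- that walks the rows of each column once per collapse pass, skipping '0' cells.

-- shared low-level board primitives (papan[i][j] read / write with Nat indices; total via defaults,
-- in-range wherever the ports use them on Pre_ inputs)
def pvGet (b : List (List String)) (i j : Nat) : String := (b.getD i []).getD j ""
def pvSet (b : List (List String)) (i j : Nat) (v : String) : List (List String) :=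
  b.set i ((b.getD i []).set j v)
-- range(n-1, -1, -1) as a Nat list [n-1, …, 0]
def pvDownFrom : Nat → List Nat
  | 0 => []
  | n + 1 => n :: pvDownFrom n
-- termination fuel shared by both ports: the while loop is encoded by fuel (each collapse pass of
-- either Python removes at least one full row of '1's, so the '1'-count bounds the iterations)
def pvFuel (papan : List (List String)) : Nat := (papan.map (fun row => row.count "1")).sum + 1

-- ===== PORT A =====
-- all(papan[i][j] == '1' for j in range(C))
def rowFullA (row : List String) (C : Nat) : Bool := (List.range C).all (fun j => row.getD j "" == "1")
-- baris_penuh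
def fullRowsA (papan : List (List String)) (R C : Nat) : List Nat :=
  (List.range R).foldl (fun acc i => if rowFullA (papan.getD i []) C then acc ++ [i] else acc) []
-- for k in range(R-1,-1,-1): if papan_baru[k][j] == '0': papan_baru[k][j] = v; break
def placeA : List Nat → List (List String) → Nat → String → List (List String)
  | [], b, _, _ => b
  | k :: ks, b, j, v => if pvGet b k j == "0" then pvSet b k j v else placeA ks b j v
-- one collapse pass: papan_baru filled row by row (i descending), column by column
def stepA (papan : List (List String)) (bp : List Nat) (R C : Nat) : List (List String) :=
  (pvDownFrom R).foldl
    (fun b i =>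
      if i ∈ bp then b
      else (List.range C).foldl (fun b' j => placeA (pvDownFrom R) b' j (pvGet papan i j)) b)
    (List.replicate R (List.replicate C "0"))
-- while True: …
def loopA : Nat → List (List String) → Nat → Nat → List (List String)
  | 0, papan, _, _ => papan
  | f + 1, papan, R, C =>
    let bp := fullRowsA papan R C
    if bp = [] then papan else loopA f (stepA papan bp R C) R C

def runtuh (papan : List (List String)) : List (List String) :=
  loopA (pvFuel papan) papan papan.length ((papan.getD 0 []).length)

-- ===== PORT B =====
-- all(c == '1' for c in row[:C])
def rowFullB (row : List String) (C : Nat) : Bool := (row.take C).all (fun c => c == "1")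
-- per-column write pointer k, one descending pass over the rows, '0' cells skipped
-- (a write never occurs at pointer 0 with further values pending while some row is full,
-- so the Nat subtraction k - 1 is exact wherever stepB is reached on Pre_ inputs)
def dropColB (papan : List (List String)) (full : List Bool) (R j : Nat)
    (b : List (List String)) : List (List String) :=
  ((pvDownFrom R).foldl
    (fun s i =>
      if (!(full.getD i false)) && (pvGet papan i j != "0")
      then (pvSet s.1 s.2 j (pvGet papan i j), s.2 - 1)
      else s)
    (b, R - 1)).1
def stepB (papan : List (List String)) (full : List Bool) (R C : Nat) : List (List String) :=
  (List.range C).foldl (fun b j => dropColB papan full R j b)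
    (List.replicate R (List.replicate C "0"))
def loopB : Nat → Nat → List (List String) → List (List String)
  | 0, _, papan => papan
  | f + 1, C, papan =>
    let full := papan.map (fun row => rowFullB row C)
    if full.any id then loopB f C (stepB papan full papan.length C) else papan

def runtuh_alt (papan : List (List String)) : List (List String) :=
  loopB (pvFuel papan) ((papan.getD 0 []).length) papan

-- ===== PRECONDITION & SPEC =====
-- Pre_ excludes exactly the inputs where A does not return: the empty board and a zero-width first
-- row (IndexError / infinite loop), and ragged boards that reach an out-of-range read (a row shorter
-- than len(papan[0]) that is all '1', or any full row next to such a short row → IndexError); ragged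
-- boards on which no row prefix is all '1' are kept (A returns them unchanged).
def Pre_runtuh (papan : List (List String)) : Prop :=
  papan ≠ [] ∧ 0 < (papan.getD 0 []).length ∧
    ((∀ row ∈ papan, (papan.getD 0 []).length ≤ row.length) ∨
     (∀ row ∈ papan, (row.take (papan.getD 0 []).length).all (fun c => c == "1") = false))
instance (papan : List (List String)) : Decidable (Pre_runtuh papan) := by
  unfold Pre_runtuh; infer_instance

def pvWitness_runtuh : List (List String) := [["1", "1"], ["0", "2"]]

def Spec_runtuh (papan : List (List String)) (out : List (List String)) : Prop := out = runtuh_alt papan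
instance (papan : List (List String)) (out : List (List String)) : Decidable (Spec_runtuh papan out) := by unfold Spec_runtuh; infer_instance

-- ===== CLAIM (what is proved, stated in full; the proofs are below) =====
def Claim_equal_runtuh : Prop := ∀ (papan : List (List String)), Dom_runtuh papan → Pre_runtuh papan → Spec_runtuh papan (runtuh papan)

-- ===== LEMMAS AND PROOFS =====

-- board well-formedness and the column view
def pvWF (b : List (List String)) (R C : Nat) : Prop := b.length = R ∧ ∀ row ∈ b, row.length = C
def pvCol (b : List (List String)) (j : Nat) : List String := b.map (fun row => row.getD j "")
-- the shape a column has after some values were dropped into it: zeros on top, values below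
def pvShape (R : Nat) (vs : List String) : List String :=
  List.replicate (R - vs.length) "0" ++ vs.reverse
def pvPush (vs : List String) (v : String) : List String := if v = "0" then vs else vs ++ [v]
-- the non-'0' values of the non-full rows listed in is (descending), in column j
def pvVals (papan : List (List String)) (fp : Nat → Bool) (is : List Nat) (j : Nat) : List String :=
  (is.filter (fun i => !(fp i) && pvGet papan i j != "0")).map (fun i => pvGet papan i j)
-- the column-level mirror of placeA
def pvPlaceCol : List Nat → List String → String → List String
  | [], col, _ => col
  | k :: ks, col, v => if col.getD k "" == "0" then col.set k v else pvPlaceCol ks col v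
-- named forms of the two inner loop bodies (definitionally the lambdas in stepA / dropColB)
def pvRowStep (papan : List (List String)) (bp : List Nat) (R C : Nat) :
    List (List String) → Nat → List (List String) := fun b i =>
  if i ∈ bp then b
  else (List.range C).foldl (fun b' j => placeA (pvDownFrom R) b' j (pvGet papan i j)) b
def pvColStep (papan : List (List String)) (full : List Bool) (j : Nat) :
    (List (List String) × Nat) → Nat → (List (List String) × Nat) := fun s i =>
  if (!(full.getD i false)) && (pvGet papan i j != "0")
  then (pvSet s.1 s.2 j (pvGet papan i j), s.2 - 1)
  else s

theorem pvDownFrom_length (n : Nat) : (pvDownFrom n).length = n := by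
  induction n with
  | zero => rfl
  | succ n ih => simp [pvDownFrom, ih]

theorem mem_pvDownFrom {i n : Nat} : i ∈ pvDownFrom n ↔ i < n := by
  induction n with
  | zero => simp [pvDownFrom]
  | succ n ih => simp [pvDownFrom, ih]; omega

theorem pvGet_col (b : List (List String)) (i j : Nat) :
    pvGet b i j = (pvCol b j).getD i "" := by
  induction b generalizing i with
  | nil => simp [pvGet, pvCol]
  | cons r t ih =>
    cases i with
    | zero => simp [pvGet, pvCol]
    | succ i => simpa [pvGet, pvCol] using ih i

theorem pvCol_set_self (b : List (List String)) (i j : Nat) (v : String)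
    (hb : ∀ row ∈ b, j < row.length) :
    pvCol (pvSet b i j v) j = (pvCol b j).set i v := by
  induction b generalizing i with
  | nil => simp [pvSet, pvCol]
  | cons r t ih =>
    cases i with
    | zero =>
      have hr : j < r.length := hb r (by simp)
      simp [pvSet, pvCol, List.getD, hr]
    | succ i =>
      have := ih i (fun row hrow => hb row (by simp [hrow]))
      simpa [pvSet, pvCol] using this

theorem pvCol_set_ne (b : List (List String)) (i j j' : Nat) (v : String) (h : j' ≠ j) :
    pvCol (pvSet b i j v) j' = pvCol b j' := by
  induction b generalizing i with
  | nil => simp [pvSet, pvCol]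
  | cons r t ih =>
    cases i with
    | zero => simp [pvSet, pvCol, List.getD, List.getElem?_set_ne (by omega : j ≠ j')]
    | succ i => simpa [pvSet, pvCol] using ih i

theorem pvWF_set (b : List (List String)) (i j : Nat) (v : String) (R C : Nat)
    (h : pvWF b R C) : pvWF (pvSet b i j v) R C := by
  obtain ⟨h1, h2⟩ := h
  refine ⟨by simpa [pvSet] using h1, ?_⟩
  intro row hrow
  rcases List.mem_or_eq_of_mem_set hrow with h' | h'
  · exact h2 row h'
  · subst h'
    rcases Nat.lt_or_ge i b.length with hi | hi
    · have hm : b.getD i [] ∈ b := by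
        rw [List.getD_eq_getElem b [] hi]; exact List.getElem_mem hi
      simpa using h2 _ hm
    · rw [pvSet, List.set_eq_of_length_le hi] at hrow
      exact h2 _ hrow

theorem placeA_col (ks : List Nat) (b : List (List String)) (j : Nat) (v : String) (R C : Nat)
    (hwf : pvWF b R C) (hj : j < C) :
    pvWF (placeA ks b j v) R C ∧
    pvCol (placeA ks b j v) j = pvPlaceCol ks (pvCol b j) v ∧
    ∀ j', j' ≠ j → pvCol (placeA ks b j v) j' = pvCol b j' := by
  induction ks generalizing b with
  | nil => exact ⟨hwf, rfl, fun _ _ => rfl⟩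
  | cons k ks ih =>
    have hrows : ∀ row ∈ b, j < row.length := fun row hrow => (hwf.2 row hrow) ▸ hj
    rw [placeA, pvPlaceCol, ← pvGet_col]
    by_cases htest : (pvGet b k j == "0") = true
    · rw [if_pos htest, if_pos htest]
      exact ⟨pvWF_set b k j v R C hwf, pvCol_set_self b k j v hrows,
        fun j' hj' => pvCol_set_ne b k j j' v hj'⟩
    · rw [if_neg htest, if_neg htest]
      exact ih b hwf

theorem pvShape_getD (R : Nat) (vs : List String) (k : Nat) :
    (pvShape R vs).getD k "" =
      if k < R - vs.length then "0" else vs.reverse.getD (k - (R - vs.length)) "" := by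
  unfold pvShape
  by_cases h : k < R - vs.length
  · simp [List.getD, List.getElem?_append, h]
  · simp [List.getD, List.getElem?_append, h]

theorem pvShape_set (R : Nat) (vs : List String) (v : String) (hlen : vs.length < R) :
    (pvShape R vs).set (R - 1 - vs.length) v =
      List.replicate (R - vs.length - 1) "0" ++ v :: vs.reverse := by
  have h1 : R - vs.length = (R - vs.length - 1) + 1 := by omega
  have h2 : R - 1 - vs.length = R - vs.length - 1 := by omega
  rw [pvShape, h1, h2, List.replicate_succ', List.append_assoc]
  simp

theorem pvShape_push (R : Nat) (vs : List String) (v : String) :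
    List.replicate (R - vs.length - 1) "0" ++ v :: vs.reverse = pvShape R (vs ++ [v]) := by
  have h1 : R - (vs ++ [v]).length = R - vs.length - 1 := by simp; omega
  rw [pvShape, h1]
  simp

theorem pvPlaceCol_skip (t : Nat) (col : List String) (v : String)
    (h : ∀ k, t < k → col.getD k "" ≠ "0") :
    ∀ n, t < n → pvPlaceCol (pvDownFrom n) col v = pvPlaceCol (pvDownFrom (t + 1)) col v := by
  intro n
  induction n with
  | zero => omega
  | succ n ih =>
    intro hn
    by_cases h' : t < n
    · have hne : (col.getD n "" == "0") = false := by
        simpa using h n h'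
      rw [pvDownFrom, pvPlaceCol, hne]
      simp only [Bool.false_eq_true, if_false]
      exact ih h'
    · have : n = t := by omega
      subst this; rfl

theorem pvPlaceCol_shape (R : Nat) (vs : List String) (v : String)
    (hlen : vs.length < R) (hvz : ∀ x ∈ vs, x ≠ "0") :
    pvPlaceCol (pvDownFrom R) (pvShape R vs) v = pvShape R (pvPush vs v) := by
  set t := R - vs.length - 1 with ht
  have hRm : R - vs.length = t + 1 := by omega
  have hnz : ∀ k, t < k → (pvShape R vs).getD k "" ≠ "0" := by
    intro k hk
    rw [pvShape_getD]
    rw [if_neg (by omega)]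
    by_cases hidx : k - (R - vs.length) < vs.reverse.length
    · have hmem : vs.reverse.getD (k - (R - vs.length)) "" ∈ vs.reverse := by
        rw [List.getD_eq_getElem _ "" hidx]; exact List.getElem_mem hidx
      exact hvz _ (List.mem_reverse.mp hmem)
    · rw [List.getD_eq_default _ _ (by omega)]
      decide
  rw [pvPlaceCol_skip t (pvShape R vs) v hnz R (by omega)]
  have hget : ((pvShape R vs).getD t "" == "0") = true := by
    rw [pvShape_getD, if_pos (by omega)]; rfl
  rw [pvDownFrom, pvPlaceCol, hget]
  simp only [if_true]
  have hset := pvShape_set R vs v hlen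
  have ht' : R - 1 - vs.length = t := by omega
  rw [ht'] at hset
  rw [hset]
  unfold pvPush
  by_cases hv : v = "0"
  · subst hv
    rw [if_pos rfl, pvShape, hRm, List.replicate_succ', List.append_assoc]
    simp
  · rw [if_neg hv]
    exact pvShape_push R vs v

theorem pvVals_append (papan : List (List String)) (fp : Nat → Bool) (is : List Nat) (i j : Nat) :
    pvVals papan fp (is ++ [i]) j =
      if !(fp i) && pvGet papan i j != "0"
      then pvVals papan fp is j ++ [pvGet papan i j] else pvVals papan fp is j := by
  unfold pvVals
  rw [List.filter_append, List.map_append]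
  by_cases h : (!(fp i) && pvGet papan i j != "0") = true
  · rw [if_pos h]
    simp [h]
  · rw [if_neg h]
    simp [Bool.eq_false_iff.mpr h]

theorem pvVals_push (papan : List (List String)) (fp : Nat → Bool) (is : List Nat) (i j : Nat)
    (h : fp i = false) :
    pvVals papan fp (is ++ [i]) j = pvPush (pvVals papan fp is j) (pvGet papan i j) := by
  rw [pvVals_append, pvPush]
  by_cases hv : pvGet papan i j = "0"
  · rw [if_pos hv, if_neg (by simp [h, hv])]
  · rw [if_neg hv, if_pos (by simp [h, hv])]

theorem pvVals_full (papan : List (List String)) (fp : Nat → Bool) (is : List Nat) (i j : Nat)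
    (h : fp i = true) : pvVals papan fp (is ++ [i]) j = pvVals papan fp is j := by
  rw [pvVals_append, if_neg (by simp [h])]

theorem pvVals_len (papan : List (List String)) (fp : Nat → Bool) (is : List Nat) (j : Nat) :
    (pvVals papan fp is j).length ≤ is.length := by
  unfold pvVals
  rw [List.length_map]
  exact List.length_filter_le _ _

theorem pvVals_ne_zero (papan : List (List String)) (fp : Nat → Bool) (is : List Nat) (j : Nat) :
    ∀ x ∈ pvVals papan fp is j, x ≠ "0" := by
  intro x hx
  unfold pvVals at hx
  rw [List.mem_map] at hx
  obtain ⟨i, hi, hxi⟩ := hx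
  rw [List.mem_filter] at hi
  have := hi.2
  simp only [Bool.and_eq_true, bne_iff_ne] at this
  rw [← hxi]
  exact this.2

theorem pvVals_congr (papan : List (List String)) (fp fp' : Nat → Bool) (is : List Nat) (j : Nat)
    (h : ∀ i ∈ is, fp i = fp' i) : pvVals papan fp is j = pvVals papan fp' is j := by
  unfold pvVals
  rw [List.filter_congr (fun i hi => by rw [h i hi])]

-- A's inner loop over the columns, one non-full row i
theorem stepA_row (papan : List (List String)) (i : Nat) (R C : Nat) :
    ∀ (js : List Nat) (b : List (List String)) (V : Nat → List String),
      (∀ j ∈ js, j < C) → js.Nodup → pvWF b R C →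
      (∀ j, j < C → pvCol b j = pvShape R (V j)) →
      (∀ j ∈ js, (V j).length < R) →
      (∀ j ∈ js, ∀ x ∈ V j, x ≠ "0") →
      pvWF (js.foldl (fun b' j => placeA (pvDownFrom R) b' j (pvGet papan i j)) b) R C ∧
      ∀ j, j < C →
        pvCol (js.foldl (fun b' j => placeA (pvDownFrom R) b' j (pvGet papan i j)) b) j =
          pvShape R (if j ∈ js then pvPush (V j) (pvGet papan i j) else V j) := by
  intro js
  induction js with
  | nil =>
    intro b V _ _ hwf hcols _ _
    exact ⟨hwf, fun j hj => by simpa using hcols j hj⟩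
  | cons j0 rest ih =>
    intro b V hjs hnd hwf hcols hlen hnz
    have hj0 : j0 < C := hjs j0 (by simp)
    obtain ⟨hwf1, hcol1, hcol1'⟩ :=
      placeA_col (pvDownFrom R) b j0 (pvGet papan i j0) R C hwf hj0
    have hplace : pvCol (placeA (pvDownFrom R) b j0 (pvGet papan i j0)) j0 =
        pvShape R (pvPush (V j0) (pvGet papan i j0)) := by
      rw [hcol1, hcols j0 hj0]
      exact pvPlaceCol_shape R (V j0) _ (hlen j0 (by simp)) (hnz j0 (by simp))
    have hnd' : rest.Nodup := (List.nodup_cons.mp hnd).2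
    have hj0rest : j0 ∉ rest := (List.nodup_cons.mp hnd).1
    have hmain := ih (placeA (pvDownFrom R) b j0 (pvGet papan i j0))
      (fun j => if j = j0 then pvPush (V j0) (pvGet papan i j0) else V j)
      (fun j hj => hjs j (by simp [hj])) hnd' hwf1
      (fun j hj => by
        by_cases hjj : j = j0
        · subst hjj; simpa using hplace
        · rw [hcol1' j hjj]; simp only [if_neg hjj]; exact hcols j hj)
      (fun j hj => by simp only [if_neg (fun h => hj0rest (h ▸ hj) : ¬ j = j0)]; exact hlen j (by simp [hj]))
      (fun j hj => by simp only [if_neg (fun h => hj0rest (h ▸ hj) : ¬ j = j0)]; exact hnz j (by simp [hj]))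
    rw [List.foldl_cons]
    refine ⟨hmain.1, fun j hj => ?_⟩
    rw [hmain.2 j hj]
    by_cases hjj : j = j0
    · subst hjj
      simp [hj0rest]
    · by_cases hjr : j ∈ rest
      · simp [hjr, hjj]
      · simp [hjr, hjj]

-- A's outer loop over the rows
theorem stepA_rows (papan : List (List String)) (bp : List Nat) (R C : Nat)
    (fp : Nat → Bool) (hbp : ∀ i, i < R → (i ∈ bp ↔ fp i = true)) :
    ∀ (post pre : List Nat) (b : List (List String)),
      (∀ i ∈ post, i < R) → pre.length + post.length = R → pvWF b R C →
      (∀ j, j < C → pvCol b j = pvShape R (pvVals papan fp pre j)) →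
      pvWF (post.foldl (pvRowStep papan bp R C) b) R C ∧
      ∀ j, j < C →
        pvCol (post.foldl (pvRowStep papan bp R C) b) j =
          pvShape R (pvVals papan fp (pre ++ post) j) := by
  intro post
  induction post with
  | nil =>
    intro pre b _ _ hwf hcols
    exact ⟨hwf, fun j hj => by simpa using hcols j hj⟩
  | cons i rest ih =>
    intro pre b hpost hlens hwf hcols
    have hiR : i < R := hpost i (by simp)
    rw [List.foldl_cons]
    have hassoc : pre ++ i :: rest = (pre ++ [i]) ++ rest := by simp
    rw [hassoc]
    by_cases hmem : i ∈ bp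
    · have hfp : fp i = true := (hbp i hiR).mp hmem
      have hstep : pvRowStep papan bp R C b i = b := by
        rw [pvRowStep, if_pos hmem]
      rw [hstep]
      exact ih (pre ++ [i]) b (fun i' hi' => hpost i' (by simp [hi']))
        (by simp at hlens ⊢; omega) hwf
        (fun j hj => by rw [pvVals_full papan fp pre i j hfp]; exact hcols j hj)
    · have hfp : fp i = false := by
        cases h : fp i with
        | false => rfl
        | true => exact absurd ((hbp i hiR).mpr h) hmem
      have hstep : pvRowStep papan bp R C b i =
          (List.range C).foldl (fun b' j => placeA (pvDownFrom R) b' j (pvGet papan i j)) b := by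
        rw [pvRowStep, if_neg hmem]
      rw [hstep]
      have hpre_lt : pre.length < R := by simp at hlens; omega
      obtain ⟨hwf1, hcols1⟩ := stepA_row papan i R C (List.range C) b
        (fun j => pvVals papan fp pre j)
        (fun j hj => List.mem_range.mp hj) (List.nodup_range) hwf hcols
        (fun j _ => Nat.lt_of_le_of_lt (pvVals_len papan fp pre j) hpre_lt)
        (fun j _ => pvVals_ne_zero papan fp pre j)
      exact ih (pre ++ [i]) _ (fun i' hi' => hpost i' (by simp [hi']))
        (by simp at hlens ⊢; omega) hwf1
        (fun j hj => by
          rw [hcols1 j hj, if_pos (List.mem_range.mpr hj),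
            pvVals_push papan fp pre i j hfp])

theorem stepA_spec (papan : List (List String)) (bp : List Nat) (R C : Nat)
    (fp : Nat → Bool) (hbp : ∀ i, i < R → (i ∈ bp ↔ fp i = true)) :
    pvWF (stepA papan bp R C) R C ∧
    ∀ j, j < C → pvCol (stepA papan bp R C) j = pvShape R (pvVals papan fp (pvDownFrom R) j) := by
  have hbase : pvWF (List.replicate R (List.replicate C "0")) R C :=
    ⟨by simp, fun row hrow => by rw [List.eq_of_mem_replicate hrow]; simp⟩
  have hbasecols : ∀ j, j < C →
      pvCol (List.replicate R (List.replicate C "0")) j = pvShape R [] := by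
    intro j hj
    simp [pvCol, pvShape, List.map_replicate, List.getD, hj]
  have := stepA_rows papan bp R C fp hbp (pvDownFrom R) [] _
    (fun i hi => mem_pvDownFrom.mp hi) (by simp [pvDownFrom_length]) hbase
    (fun j hj => hbasecols j hj)
  exact ⟨this.1, fun j hj => by simpa using this.2 j hj⟩

-- B's inner loop down one column
theorem dropColB_fold (papan : List (List String)) (full : List Bool) (R C j : Nat) (hj : j < C) :
    ∀ (post pre : List Nat) (b : List (List String)),
      pre.length + post.length = R → pvWF b R C →
      pvCol b j = pvShape R (pvVals papan (fun i => full.getD i false) pre j) →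
      pvWF ((post.foldl (pvColStep papan full j)
          (b, R - 1 - (pvVals papan (fun i => full.getD i false) pre j).length)).1) R C ∧
      pvCol ((post.foldl (pvColStep papan full j)
          (b, R - 1 - (pvVals papan (fun i => full.getD i false) pre j).length)).1) j =
        pvShape R (pvVals papan (fun i => full.getD i false) (pre ++ post) j) ∧
      (∀ j', j' ≠ j →
        pvCol ((post.foldl (pvColStep papan full j)
          (b, R - 1 - (pvVals papan (fun i => full.getD i false) pre j).length)).1) j' = pvCol b j') := by
  intro post
  induction post with
  | nil =>
    intro pre b _ hwf hcol
    exact ⟨hwf, by simpa using hcol, fun _ _ => rfl⟩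
  | cons i rest ih =>
    intro pre b hlens hwf hcol
    set fp := fun i => full.getD i false with hfp
    have hassoc : pre ++ i :: rest = (pre ++ [i]) ++ rest := by simp
    rw [hassoc, List.foldl_cons]
    by_cases hc : ((!(fp i)) && (pvGet papan i j != "0")) = true
    · have hfpi : fp i = false := by
        rcases Bool.and_eq_true .. |>.mp hc with ⟨h1, _⟩
        simpa using h1
      have hvne : pvGet papan i j ≠ "0" := by
        rcases Bool.and_eq_true .. |>.mp hc with ⟨_, h2⟩
        simpa using h2
      have hstep : pvColStep papan full j
          (b, R - 1 - (pvVals papan fp pre j).length) i =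
          (pvSet b (R - 1 - (pvVals papan fp pre j).length) j (pvGet papan i j),
            R - 1 - (pvVals papan fp pre j).length - 1) := by
        have hc' := hc
        simp only [hfp] at hc'
        rw [pvColStep]
        simp only [hc', if_true]
      rw [hstep]
      have hm : (pvVals papan fp pre j).length < R := by
        have := pvVals_len papan fp pre j
        simp at hlens; omega
      have hrows : ∀ row ∈ b, j < row.length := fun row hrow => (hwf.2 row hrow) ▸ hj
      have hnewvals : pvVals papan fp (pre ++ [i]) j =
          pvVals papan fp pre j ++ [pvGet papan i j] := by
        rw [pvVals_push papan fp pre i j hfpi, pvPush, if_neg hvne]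
      have hnewcol : pvCol (pvSet b (R - 1 - (pvVals papan fp pre j).length) j
            (pvGet papan i j)) j = pvShape R (pvVals papan fp (pre ++ [i]) j) := by
        rw [pvCol_set_self _ _ _ _ hrows, hcol, pvShape_set R _ _ hm,
          pvShape_push, hnewvals]
      have hptr : R - 1 - (pvVals papan fp pre j).length - 1 =
          R - 1 - (pvVals papan fp (pre ++ [i]) j).length := by
        rw [hnewvals]; simp; omega
      rw [hptr]
      have := ih (pre ++ [i]) _ (by simp at hlens ⊢; omega)
        (pvWF_set b _ j _ R C hwf) hnewcol
      exact ⟨this.1, this.2.1, fun j' hj' => by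
        rw [this.2.2 j' hj', pvCol_set_ne _ _ _ _ _ hj']⟩
    · have hstep : pvColStep papan full j
          (b, R - 1 - (pvVals papan fp pre j).length) i =
          (b, R - 1 - (pvVals papan fp pre j).length) := by
        have hc' := Bool.eq_false_iff.mpr hc
        simp only [hfp] at hc'
        rw [pvColStep]
        simp only [hc', Bool.false_eq_true, if_false]
      rw [hstep]
      have hnewvals : pvVals papan fp (pre ++ [i]) j = pvVals papan fp pre j := by
        rw [pvVals_append, if_neg hc]
      have := ih (pre ++ [i]) b (by simp at hlens ⊢; omega) hwf
        (by rw [hnewvals]; exact hcol)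
      rw [hnewvals] at this
      exact this

-- B's outer loop over the columns
theorem stepB_cols (papan : List (List String)) (full : List Bool) (R C : Nat) :
    ∀ (js : List Nat) (b : List (List String)),
      (∀ j ∈ js, j < C) → js.Nodup → pvWF b R C →
      (∀ j, j < C → pvCol b j = if j ∈ js then pvShape R [] else
          pvShape R (pvVals papan (fun i => full.getD i false) (pvDownFrom R) j)) →
      pvWF (js.foldl (fun b j => dropColB papan full R j b) b) R C ∧
      ∀ j, j < C →
        pvCol (js.foldl (fun b j => dropColB papan full R j b) b) j =
          pvShape R (pvVals papan (fun i => full.getD i false) (pvDownFrom R) j) := by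
  intro js
  induction js with
  | nil =>
    intro b _ _ hwf hcols
    refine ⟨hwf, fun j hj => ?_⟩
    simpa using hcols j hj
  | cons j0 rest ih =>
    intro b hjs hnd hwf hcols
    have hj0 : j0 < C := hjs j0 (by simp)
    have hj0rest : j0 ∉ rest := (List.nodup_cons.mp hnd).1
    have hnd' : rest.Nodup := (List.nodup_cons.mp hnd).2
    have hdef : dropColB papan full R j0 b =
        ((pvDownFrom R).foldl (pvColStep papan full j0) (b, R - 1)).1 := rfl
    have hcol0 : pvCol b j0 = pvShape R (pvVals papan (fun i => full.getD i false) [] j0) := by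
      have := hcols j0 hj0
      rw [if_pos (by simp)] at this
      simpa [pvVals] using this
    have hfold := dropColB_fold papan full R C j0 hj0 (pvDownFrom R) [] b
      (by simp [pvDownFrom_length]) hwf hcol0
    rw [List.foldl_cons, hdef]
    have hinit : (b, R - 1) =
        (b, R - 1 - (pvVals papan (fun i => full.getD i false) [] j0).length) := by
      simp [pvVals]
    rw [hinit]
    have hrest := ih ((pvDownFrom R).foldl (pvColStep papan full j0)
        (b, R - 1 - (pvVals papan (fun i => full.getD i false) [] j0).length)).1
      (fun j hj => hjs j (by simp [hj])) hnd' hfold.1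
      (fun j hj => by
        by_cases hjr : j ∈ rest
        · rw [if_pos hjr]
          have hne : j ≠ j0 := fun h => hj0rest (h ▸ hjr)
          rw [hfold.2.2 j hne]
          have := hcols j hj
          rw [if_pos (by simp [hjr])] at this
          exact this
        · rw [if_neg hjr]
          by_cases hjj : j = j0
          · subst hjj
            simpa using hfold.2.1
          · rw [hfold.2.2 j hjj]
            have := hcols j hj
            rw [if_neg (by simp [hjj, hjr])] at this
            exact this)
    exact hrest

theorem stepB_spec (papan : List (List String)) (full : List Bool) (R C : Nat) :
    pvWF (stepB papan full R C) R C ∧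
    ∀ j, j < C → pvCol (stepB papan full R C) j =
      pvShape R (pvVals papan (fun i => full.getD i false) (pvDownFrom R) j) := by
  have hbase : pvWF (List.replicate R (List.replicate C "0")) R C :=
    ⟨by simp, fun row hrow => by rw [List.eq_of_mem_replicate hrow]; simp⟩
  exact stepB_cols papan full R C (List.range C) _
    (fun j hj => List.mem_range.mp hj) List.nodup_range hbase
    (fun j hj => by
      rw [if_pos (List.mem_range.mpr hj)]
      simp [pvCol, pvShape, List.map_replicate, List.getD, hj])

theorem boards_eq_of_cols (b b' : List (List String)) (R C : Nat)
    (h1 : pvWF b R C) (h2 : pvWF b' R C)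
    (h : ∀ j, j < C → pvCol b j = pvCol b' j) : b = b' := by
  apply List.ext_getElem (h1.1.trans h2.1.symm)
  intro r hr hr'
  have hrowlen : b[r].length = C := h1.2 _ (List.getElem_mem hr)
  have hrowlen' : b'[r].length = C := h2.2 _ (List.getElem_mem hr')
  apply List.ext_getElem (hrowlen.trans hrowlen'.symm)
  intro j hjb hjb'
  have hj : j < C := hrowlen ▸ hjb
  have hcb : (pvCol b j)[r]'(by simpa [pvCol] using hr) = b[r].getD j "" := by
    simp [pvCol]
  have hcb' : (pvCol b' j)[r]'(by simpa [pvCol] using hr') = b'[r].getD j "" := by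
    simp [pvCol]
  have := h j hj
  have hget : b[r].getD j "" = b'[r].getD j "" := by
    rw [← hcb, ← hcb']
    congr 1
  rw [List.getD_eq_getElem _ "" hjb, List.getD_eq_getElem _ "" hjb'] at hget
  exact hget

-- detection lemmas
theorem rowFullA_imp_B (row : List String) (C : Nat) (h : rowFullA row C = true) :
    rowFullB row C = true := by
  rw [rowFullB, List.all_eq_true]
  intro x hx
  obtain ⟨k, hk, hxk⟩ := List.mem_iff_getElem.mp hx
  have hkC : k < C := by
    have := hk
    simp at this
    omega
  have hkrow : k < row.length := by
    have := hk
    simp at this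
    omega
  have := List.all_eq_true.mp h k (List.mem_range.mpr hkC)
  rw [List.getD_eq_getElem _ "" hkrow] at this
  rw [← hxk, List.getElem_take]
  exact this

theorem rowFullB_imp_A (row : List String) (C : Nat) (hlen : C ≤ row.length)
    (h : rowFullB row C = true) : rowFullA row C = true := by
  rw [rowFullA, List.all_eq_true]
  intro j hj
  have hjC : j < C := List.mem_range.mp hj
  have hjrow : j < row.length := Nat.lt_of_lt_of_le hjC hlen
  have hmem : row[j] ∈ row.take C := by
    have hlt : j < (row.take C).length := by simp; omega
    have : (row.take C)[j] = row[j] := List.getElem_take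
    rw [← this]
    exact List.getElem_mem hlt
  have := List.all_eq_true.mp h _ hmem
  rw [List.getD_eq_getElem _ "" hjrow]
  exact this

theorem fullRowsA_eq_filter (papan : List (List String)) (R C : Nat) :
    fullRowsA papan R C = (List.range R).filter (fun i => rowFullA (papan.getD i []) C) := by
  rw [fullRowsA, PySem.List.foldl_append_if_eq_filter]
  simp

theorem full_getD (papan : List (List String)) (C i : Nat) (hi : i < papan.length) :
    (papan.map (fun row => rowFullB row C)).getD i false = rowFullB (papan.getD i []) C := by
  rw [List.getD_eq_getElem _ false (by simpa using hi), List.getElem_map,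
    List.getD_eq_getElem _ [] hi]

theorem rowFull_eq (papan : List (List String)) (C : Nat)
    (hlen : ∀ row ∈ papan, C ≤ row.length) (i : Nat) (hi : i < papan.length) :
    rowFullA (papan.getD i []) C = rowFullB (papan.getD i []) C := by
  have hrow : papan.getD i [] ∈ papan := by
    rw [List.getD_eq_getElem _ [] hi]; exact List.getElem_mem hi
  have hClen : C ≤ (papan.getD i []).length := hlen _ hrow
  cases hA : rowFullA (papan.getD i []) C with
  | true => rw [rowFullA_imp_B _ _ hA]
  | false =>
    cases hB : rowFullB (papan.getD i []) C with
    | true =>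
      have h' := rowFullB_imp_A _ _ hClen hB
      rw [hA] at h'
      exact absurd h' Bool.false_ne_true
    | false => rfl

theorem fullRows_mem (papan : List (List String)) (C i : Nat) (hi : i < papan.length) :
    i ∈ fullRowsA papan papan.length C ↔ rowFullA (papan.getD i []) C = true := by
  rw [fullRowsA_eq_filter]
  simp [List.mem_filter, List.mem_range, hi]

theorem fullRows_nil (papan : List (List String)) (C : Nat)
    (hlen : ∀ row ∈ papan, C ≤ row.length) :
    (fullRowsA papan papan.length C = []) ↔ ∀ row ∈ papan, rowFullB row C = false := by
  rw [fullRowsA_eq_filter, List.filter_eq_nil_iff]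
  constructor
  · intro h row hrow
    obtain ⟨i, hi, rfl⟩ := List.mem_iff_getElem.mp hrow
    have h' := h i (List.mem_range.mpr hi)
    have hd := rowFull_eq papan C hlen i hi
    rw [← List.getD_eq_getElem _ [] hi, ← hd]
    exact Bool.eq_false_iff.mpr h'
  · intro h i hi
    have hi' : i < papan.length := List.mem_range.mp hi
    have hrow : papan.getD i [] ∈ papan := by
      rw [List.getD_eq_getElem _ [] hi']; exact List.getElem_mem hi'
    have := h _ hrow
    rw [rowFull_eq papan C hlen i hi', this]
    simp

theorem anyFull (papan : List (List String)) (C : Nat) :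
    ((papan.map (fun row => rowFullB row C)).any id = false) ↔
      ∀ row ∈ papan, rowFullB row C = false := by
  simp [List.any_eq_false]

theorem step_eq (papan : List (List String)) (C : Nat)
    (hlen : ∀ row ∈ papan, C ≤ row.length) :
    stepA papan (fullRowsA papan papan.length C) papan.length C =
      stepB papan (papan.map (fun row => rowFullB row C)) papan.length C := by
  have hagree : ∀ i ∈ pvDownFrom papan.length,
      (fun i => rowFullA (papan.getD i []) C) i =
      (fun i => (papan.map (fun row => rowFullB row C)).getD i false) i := by
    intro i hi
    have hi' : i < papan.length := mem_pvDownFrom.mp hi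
    simp only
    rw [full_getD papan C i hi', rowFull_eq papan C hlen i hi']
  have hbp : ∀ i, i < papan.length →
      (i ∈ fullRowsA papan papan.length C ↔ (fun i => rowFullA (papan.getD i []) C) i = true) :=
    fun i hi => fullRows_mem papan C i hi
  obtain ⟨hwfA, hcolsA⟩ := stepA_spec papan (fullRowsA papan papan.length C)
    papan.length C _ hbp
  obtain ⟨hwfB, hcolsB⟩ := stepB_spec papan (papan.map (fun row => rowFullB row C))
    papan.length C
  apply boards_eq_of_cols _ _ papan.length C hwfA hwfB
  intro j hj
  rw [hcolsA j hj, hcolsB j hj,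
    pvVals_congr papan _ _ (pvDownFrom papan.length) j hagree]

theorem loop_eq (C : Nat) : ∀ (f : Nat) (papan : List (List String)),
    (∀ row ∈ papan, C ≤ row.length) →
    loopA f papan papan.length C = loopB f C papan := by
  intro f
  induction f with
  | zero => intro papan _; rfl
  | succ f ih =>
    intro papan hlen
    simp only [loopA, loopB]
    by_cases h0 : fullRowsA papan papan.length C = []
    · rw [if_pos h0]
      have hany : (papan.map (fun row => rowFullB row C)).any id = false :=
        (anyFull papan C).mpr ((fullRows_nil papan C hlen).mp h0)
      rw [hany]
      simp
    · rw [if_neg h0]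
      have hany : (papan.map (fun row => rowFullB row C)).any id = true := by
        cases h : (papan.map (fun row => rowFullB row C)).any id with
        | true => rfl
        | false => exact absurd ((fullRows_nil papan C hlen).mpr ((anyFull papan C).mp h)) h0
      rw [hany]
      simp only [if_true]
      rw [step_eq papan C hlen]
      have hbp : ∀ i, i < papan.length →
          (i ∈ fullRowsA papan papan.length C ↔ (fun i => rowFullA (papan.getD i []) C) i = true) :=
        fun i hi => fullRows_mem papan C i hi
      obtain ⟨hwfB, _⟩ := stepB_spec papan (papan.map (fun row => rowFullB row C))
        papan.length C
      set S := stepB papan (papan.map (fun row => rowFullB row C)) papan.length C with hS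
      have hSlen : S.length = papan.length := hwfB.1
      have hSrows : ∀ row ∈ S, C ≤ row.length := fun row hrow => le_of_eq (hwfB.2 row hrow).symm
      rw [← hSlen]
      exact ih S hSrows

-- ===== VERDICT (by name: the statement is the Claim_ definition above) =====
theorem runtuh_spec : Claim_equal_runtuh := by
  intro papan _ hpre
  obtain ⟨hne, hC, hdisj⟩ := hpre
  unfold Spec_runtuh runtuh runtuh_alt
  rcases hdisj with hlen | hnofull
  · exact loop_eq (papan.getD 0 []).length (pvFuel papan) papan hlen
  · have h0 : fullRowsA papan papan.length ((papan.getD 0 []).length) = [] := by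
      rw [fullRowsA_eq_filter, List.filter_eq_nil_iff]
      intro i hi
      have hi' : i < papan.length := List.mem_range.mp hi
      have hrow : papan.getD i [] ∈ papan := by
        rw [List.getD_eq_getElem _ [] hi']; exact List.getElem_mem hi'
      intro hfull
      have := rowFullA_imp_B _ _ hfull
      rw [rowFullB, hnofull _ hrow] at this
      exact Bool.false_ne_true this
    have hany : (papan.map (fun row => rowFullB row ((papan.getD 0 []).length))).any id = false := by
      rw [anyFull]
      intro row hrow
      exact hnofull row hrow
    simp only [pvFuel, loopA, loopB]
    rw [if_pos h0, hany]
    simp
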